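-- pv_equiv track=rewrite | github.com/espressif/esp-docs | src/esp_docs/modified_files.py | parse_modified_files_arg
-- ===== SOURCE A (Python) =====
-- def parse_modified_files_arg(modified_files):
--     if not modified_files:
--         return []
--
--     normalized_paths = []
--     for value in modified_files:
--         if not value:
--             continue
--
--         normalized_paths.extend(
--             path for path in value.split(';') if path
--         )
--
--     return normalized_paths
-- ===== SOURCE B (Python) =====
-- def parse_modified_files_arg(modified_files):
--     if not modified_files:
--         return []
--
--     paths = []
--     for value in modified_files:
--         token = []
--         for ch in value:
--             if ch == ';':
--                 if token:
--                     paths.append(''.join(token))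
--                     token = []
--             else:
--                 token.append(ch)
--         if token:
--             paths.append(''.join(token))
--     return paths
-- ===== Notes on version B (the rewrite author's own statement) =====
-- stated objective: alternative
-- what changed: Replaces per-value str.split(';') plus a filtering generator by an explicit character-by-character tokenizer that accumulates the current token and flushes it on ';' and at the end of each value, so empty pieces never exist.
import Mathlib
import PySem

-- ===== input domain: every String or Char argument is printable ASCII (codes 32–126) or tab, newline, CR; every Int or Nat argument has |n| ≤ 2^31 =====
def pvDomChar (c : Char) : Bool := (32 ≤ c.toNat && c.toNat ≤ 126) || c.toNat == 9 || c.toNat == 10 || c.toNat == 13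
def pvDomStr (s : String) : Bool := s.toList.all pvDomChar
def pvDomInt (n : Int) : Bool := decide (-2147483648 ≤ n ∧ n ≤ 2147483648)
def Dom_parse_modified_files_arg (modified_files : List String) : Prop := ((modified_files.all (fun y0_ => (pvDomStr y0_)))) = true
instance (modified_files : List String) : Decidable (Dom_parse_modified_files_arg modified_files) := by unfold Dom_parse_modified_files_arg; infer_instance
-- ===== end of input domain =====

-- B replaces A's per-value split(';')+filter with an explicit character-by-character
-- tokenizer (accumulate current token, flush on ';' and at end of value); objective:
-- alternative, same asymptotic cost.


-- ===== PORT A =====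
-- A: guard `not modified_files`, then for each non-empty value extend the accumulator with
-- the non-empty pieces of value.split(';').  (sep ";" is non-empty, so Chars.splitOn is
-- exactly Python's str.split(';'))
def parse_modified_files_arg (modified_files : List String) : List String :=
  if modified_files.isEmpty then []
  else
    modified_files.foldl (fun acc value =>
      if value = "" then acc
      else acc ++ ((PySem.Chars.splitOn value.toList [';']).map String.ofList).filter
                    (fun p => p ≠ "")) []

-- ===== PORT B =====
-- B: hand-written tokenizer; one step of the inner character loop:
-- on ';' flush the current token (if non-empty), otherwise append the char to it.
def pmfAltStep (st : List String × List Char) (c : Char) : List String × List Char :=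
  if c = ';' then
    if st.2 ≠ [] then (st.1 ++ [String.ofList st.2], []) else (st.1, [])
  else (st.1, st.2 ++ [c])

-- B: guard `not modified_files`; for each value scan its characters with pmfAltStep and
-- flush the leftover token at the end of the value.
def parse_modified_files_arg_alt (modified_files : List String) : List String :=
  if modified_files.isEmpty then []
  else
    modified_files.foldl (fun paths value =>
      let st := value.toList.foldl pmfAltStep (paths, [])
      if st.2 ≠ [] then st.1 ++ [String.ofList st.2] else st.1) []

-- ===== PRECONDITION & SPEC =====
def Spec_parse_modified_files_arg (modified_files : List String) (out : List String) : Prop := out = parse_modified_files_arg_alt modified_files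
instance (modified_files : List String) (out : List String) : Decidable (Spec_parse_modified_files_arg modified_files out) := by unfold Spec_parse_modified_files_arg; infer_instance

-- ===== CLAIM (what is proved, stated in full; the proofs are below) =====
def Claim_equal_parse_modified_files_arg : Prop := ∀ (modified_files : List String), Dom_parse_modified_files_arg modified_files → Spec_parse_modified_files_arg modified_files (parse_modified_files_arg modified_files)

-- ===== LEMMAS AND PROOFS =====

-- Simple structural characterisation of splitting on the single character ';'.
def semiSplit : List Char → List (List Char)
  | [] => [[]]
  | c :: rest => if c = ';' then [] :: semiSplit rest else (semiSplit rest).modifyHead (c :: ·)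

theorem semiSplit_ne_nil (cs : List Char) : semiSplit cs ≠ [] := by
  induction cs with
  | nil => simp [semiSplit]
  | cons c rest ih =>
    simp only [semiSplit]
    split
    · simp
    · cases h : semiSplit rest with
      | nil => exact absurd h ih
      | cons a t => simp

theorem splitOn_go_eq (fuel : Nat) : ∀ (l cur : List Char) (accs : List (List Char)),
    l.length ≤ fuel →
    PySem.Chars.splitOn.go [';'] fuel l cur accs
      = accs.reverse ++ (semiSplit l).modifyHead (cur.reverse ++ ·) := by
  induction fuel with
  | zero =>
    intro l cur accs h
    have hl : l = [] := List.eq_nil_of_length_eq_zero (Nat.le_zero.mp h)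
    subst hl
    simp [PySem.Chars.splitOn.go, semiSplit]
  | succ fuel ih =>
    intro l cur accs h
    cases l with
    | nil => simp [PySem.Chars.splitOn.go, semiSplit]
    | cons c rest =>
      rw [PySem.Chars.splitOn.go]
      by_cases hc : c = ';'
      · subst hc
        rw [if_pos (by simp [List.isPrefixOf])]
        simp only [List.length_cons, List.drop_succ_cons, List.length_nil, List.drop_zero]
        simp only [List.length_cons] at h
        rw [ih _ _ _ (Nat.le_of_succ_le_succ h)]
        cases hs : semiSplit rest with
        | nil => exact absurd hs (semiSplit_ne_nil rest)
        | cons x t => simp [semiSplit, hs]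
      · rw [if_neg (by simp [List.isPrefixOf]; exact fun h' => hc h'.symm)]
        simp only [List.length_cons] at h
        rw [ih _ _ _ (Nat.le_of_succ_le_succ h)]
        cases hs : semiSplit rest with
        | nil => exact absurd hs (semiSplit_ne_nil rest)
        | cons x t => simp [semiSplit, hc, hs]

theorem splitOn_eq_semiSplit (cs : List Char) :
    PySem.Chars.splitOn cs [';'] = semiSplit cs := by
  unfold PySem.Chars.splitOn
  rw [splitOn_go_eq (cs.length + 1) cs [] [] (by omega)]
  cases h : semiSplit cs with
  | nil => exact absurd h (semiSplit_ne_nil cs)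
  | cons a t => simp

theorem filter_map_ofList (xs : List (List Char)) :
    ((xs.map String.ofList).filter (fun p => p ≠ ""))
      = (xs.filter (fun q => q ≠ [])).map String.ofList := by
  induction xs with
  | nil => rfl
  | cons x t ih =>
    by_cases hx : x = []
    · subst hx; simpa [String.ofList] using ih
    · have hne : String.ofList x ≠ "" := by
        intro h
        exact hx (by simpa using congrArg String.toList h)
      simp only [ne_eq, decide_not] at ih
      simp [hx, hne, ih]

theorem modifyHead_nil_append (l : List (List Char)) :
    l.modifyHead (fun x => [] ++ x) = l := by
  cases l <;> simp

-- Invariant of the character scan: the output so far plus the flushed non-empty tokens of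
-- the processed prefix, and the pending token = last segment of the ';'-split (with the
-- incoming token prefixed to the first segment).
theorem scan_eq (cs : List Char) : ∀ (tok : List Char) (out : List String),
    cs.foldl pmfAltStep (out, tok)
      = (out ++ ((((semiSplit cs).modifyHead (tok ++ ·)).dropLast.filter
            (fun q => q ≠ [])).map String.ofList),
         ((semiSplit cs).modifyHead (tok ++ ·)).getLastD []) := by
  induction cs with
  | nil => intro tok out; simp [semiSplit]
  | cons c rest ih =>
    intro tok out
    rw [List.foldl_cons]
    by_cases hc : c = ';'
    · subst hc
      have hsem : semiSplit (';' :: rest) = [] :: semiSplit rest := by simp [semiSplit]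
      rw [hsem]
      cases hs : semiSplit rest with
      | nil => exact absurd hs (semiSplit_ne_nil rest)
      | cons x t =>
        by_cases ht : tok = []
        · subst ht
          have hstep : pmfAltStep (out, ([] : List Char)) ';' = (out, []) := by
            simp [pmfAltStep]
          have hrec := ih [] out
          rw [hs, modifyHead_nil_append] at hrec
          rw [hstep, hrec]
          simp [List.dropLast_cons₂]
        · have hstep : pmfAltStep (out, tok) ';' = (out ++ [String.ofList tok], []) := by
            simp [pmfAltStep, ht]
          have hrec := ih [] (out ++ [String.ofList tok])
          rw [hs, modifyHead_nil_append] at hrec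
          rw [hstep, hrec]
          simp [List.dropLast_cons₂, ht, List.append_assoc]
    · have hsemi : (semiSplit (c :: rest)).modifyHead (tok ++ ·)
          = (semiSplit rest).modifyHead ((tok ++ [c]) ++ ·) := by
        simp only [semiSplit, if_neg hc]
        cases hs : semiSplit rest with
        | nil => exact absurd hs (semiSplit_ne_nil rest)
        | cons x t => simp
      rw [hsemi]
      have hstep : pmfAltStep (out, tok) c = (out, tok ++ [c]) := by
        simp [pmfAltStep, hc]
      rw [hstep, ih (tok ++ [c]) out]

-- Flushing the leftover token turns "filtered dropLast + pending last" into the filtered whole.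
theorem flush_eq (l : List (List Char)) (h : l ≠ []) :
    (if l.getLastD [] ≠ [] then
        ((l.dropLast.filter (fun q => q ≠ [])).map String.ofList) ++ [String.ofList (l.getLastD [])]
      else ((l.dropLast.filter (fun q => q ≠ [])).map String.ofList))
      = (l.filter (fun q => q ≠ [])).map String.ofList := by
  have hd : l.getLastD [] = l.getLast h := by
    rw [List.getLastD_eq_getLast?, List.getLast?_eq_some_getLast h]
    rfl
  conv_rhs => rw [← List.dropLast_append_getLast h]
  rw [List.filter_append, List.map_append, hd]
  by_cases hx : l.getLast h = [] <;> simp [hx]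

-- One value's contribution in B equals its contribution in A's form.
theorem valueStep_eq (out : List String) (value : String) :
    (let st := value.toList.foldl pmfAltStep (out, [])
     if st.2 ≠ [] then st.1 ++ [String.ofList st.2] else st.1)
      = out ++ ((semiSplit value.toList).filter (fun q => q ≠ [])).map String.ofList := by
  show (let st := value.toList.foldl pmfAltStep (out, [])
        if st.2 ≠ [] then st.1 ++ [String.ofList st.2] else st.1) = _
  rw [scan_eq value.toList [] out, modifyHead_nil_append]
  rw [← flush_eq (semiSplit value.toList) (semiSplit_ne_nil _)]
  simp only [List.getLastD_eq_getLast?]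
  split_ifs with h <;> simp [List.append_assoc]

-- ===== VERDICT (by name: the statement is the Claim_ definition above) =====
theorem parse_modified_files_arg_spec : Claim_equal_parse_modified_files_arg := by
  intro modified_files _
  unfold Spec_parse_modified_files_arg parse_modified_files_arg parse_modified_files_arg_alt
  by_cases hemp : modified_files.isEmpty
  · simp [hemp]
  · simp only [hemp, Bool.false_eq_true, reduceIte]
    congr 1
    funext acc value
    rw [valueStep_eq]
    by_cases hv : value = ""
    · subst hv
      have hnil : ("" : String).toList = [] := rfl
      simp [hnil, semiSplit]
    · rw [if_neg hv, splitOn_eq_semiSplit, filter_map_ofList]
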